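-- pv_equiv track=rewrite | github.com/PiErr0r/aoc | 2020/20.py | fill_mons
-- ===== SOURCE A (Python) =====
-- def is_monster(g, pos, m):
-- 	y, x = pos
-- 	h = len(m)
-- 	w = len(m[0])
-- 	m_cnt, g_cnt = 0, 0
--
-- 	for i in range(h):
-- 		for j in range(w):
-- 			if m[i][j] == ' ':
-- 				continue
-- 			m_cnt += 1
-- 			if g[y+i][x+j] in ['#', 'o']:
-- 				g_cnt += 1
-- 	return m_cnt == g_cnt
--
-- def fill_s_mons(g, pos, m):
-- 	y, x = pos
-- 	h, w = len(m), len(m[0])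
-- 	for i in range(h):
-- 		for j in range(w):
-- 			if m[i][j] == '#':
-- 				g[y+i] = g[y+i][:x+j] + 'o' + g[y+i][x+j + 1:]
-- 	return g
--
-- def fill_mons(img, m):
-- 	h, w = len(m), len(m[0])
-- 	i = 0
-- 	while i < len(img) - h:
-- 		j = 0
-- 		while j < len(img[0]) - w:
-- 			if is_monster(img, (i, j), m):
-- 				img = fill_s_mons(img, (i, j), m)
-- 			j += 1
-- 		i += 1
-- 	return img
-- ===== SOURCE B (Python) =====
-- def fill_mons(img, m):
--     # Two-phase constraint-filtering algorithm: a candidate set of all anchor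
--     # positions is narrowed mask-cell by mask-cell against the ORIGINAL image
--     # (transposed loop nest: mask cells outer, positions inner); then every
--     # marked cell is rewritten in one functional pass.  This is correct because
--     # A's in-place fills only turn '#'/'o' cells into 'o', which never changes
--     # any later monster test.  NOTE: A mutates img in place; B does not --
--     # the equivalence is about the return value.
--     h, w = len(m), len(m[0])
--     cand = [(y, x) for y in range(len(img) - h) for x in range(len(img[0]) - w)]
--     for i, row in enumerate(m):
--         for j, c in enumerate(row[:w]):
--             if c != ' ':
--                 cand = [(y, x) for (y, x) in cand if img[y + i][x + j] in '#o']
--     marked = {(y + i, x + j) for (y, x) in cand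
--               for i, row in enumerate(m) for j, c in enumerate(row[:w]) if c == '#'}
--     return [''.join('o' if (y, x) in marked else ch for x, ch in enumerate(row))
--             for y, row in enumerate(img)]
-- ===== Notes on version B (the rewrite author's own statement) =====
-- stated objective: alternative
-- what changed: B replaces A's interleaved scan-and-mutate (per position: full mask re-scan with counters, then in-place string splicing) by a two-phase constraint-filtering algorithm with a transposed loop nest: a candidate list of all anchor positions is narrowed mask-cell by mask-cell against the immutable original image, then the union of marked cells is applied in one functional rewrite pass; this is correct because A's fills only turn '#'/'o' cells into 'o' and so never change a later monster test. A mutates img in place, B does not (the return value is identical).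
-- outside the precondition, e.g. on fill_mons(['ab', 'cd', 'e'], [' ']): A returns ['ab', 'cd', 'e'], B returns ['ab', 'cd', 'e']
import Mathlib
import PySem

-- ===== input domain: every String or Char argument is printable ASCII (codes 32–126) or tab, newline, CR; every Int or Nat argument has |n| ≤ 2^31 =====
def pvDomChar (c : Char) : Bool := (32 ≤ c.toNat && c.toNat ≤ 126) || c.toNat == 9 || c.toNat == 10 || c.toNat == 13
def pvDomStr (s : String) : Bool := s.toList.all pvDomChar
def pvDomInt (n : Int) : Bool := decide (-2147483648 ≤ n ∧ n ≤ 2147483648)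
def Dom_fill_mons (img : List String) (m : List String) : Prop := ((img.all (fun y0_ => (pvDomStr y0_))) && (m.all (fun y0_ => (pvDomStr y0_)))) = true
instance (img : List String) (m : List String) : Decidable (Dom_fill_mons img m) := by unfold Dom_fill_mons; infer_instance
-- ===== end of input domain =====

-- B replaces A's interleaved scan-and-mutate by a two-phase constraint-filtering pass
-- (transposed loop nest: mask cells outer, candidate positions inner) over the immutable
-- original image, followed by one functional rewrite of the marked cells.
-- A mutates its img argument in place, B does not: the equivalence proved here is about
-- the return value.


-- ===== PORT A =====
-- Python len(s) on a string is ported as s.toList.length; m[0] / g[i] (in range under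
-- Pre_) as PySem.List.pyGetD; s[i] as PySem.Str.pyGet? (none = IndexError, unreached
-- under Pre_; the none branch is a total surrogate there).

-- is_monster(g, (y, x), m)
def is_monster_A (g : List String) (y x : Int) (m : List String) : Bool :=
  let h := m.length
  let w := (PySem.List.pyGetD m 0 "").toList.length
  let st := (List.range h).foldl (fun st (i : Nat) =>
    (List.range w).foldl (fun st (j : Nat) =>
      match PySem.Str.pyGet? (PySem.List.pyGetD m (i : Int) "") (j : Int) with
      | some ' ' => st                                   -- if m[i][j] == ' ': continue
      | _ =>
        let st1 : Nat × Nat := (st.1 + 1, st.2)          -- m_cnt += 1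
        match (PySem.List.pyGet? g (y + (i : Int))).bind
                (fun r => PySem.Str.pyGet? r (x + (j : Int))) with
        | some c => if c = '#' || c = 'o' then (st1.1, st1.2 + 1) else st1   -- g_cnt += 1
        | none => st1) st) ((0, 0) : Nat × Nat)
  st.1 == st.2

-- fill_s_mons(g, (y, x), m)
def fill_s_mons_A (g : List String) (y x : Int) (m : List String) : List String :=
  let h := m.length
  let w := (PySem.List.pyGetD m 0 "").toList.length
  (List.range h).foldl (fun g (i : Nat) =>
    (List.range w).foldl (fun g (j : Nat) =>
      if PySem.Str.pyGet? (PySem.List.pyGetD m (i : Int) "") (j : Int) == some '#' then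
        let row := PySem.List.pyGetD g (y + (i : Int)) ""
        -- g[y+i] = g[y+i][:x+j] + 'o' + g[y+i][x+j + 1:]
        PySem.List.pySetD g (y + (i : Int))
          (PySem.Str.slice row none (some (x + (j : Int))) ++ "o" ++
           PySem.Str.slice row (some (x + (j : Int) + 1)) none)
      else g) g) g

def fill_mons (img : List String) (m : List String) : List String :=
  let h := m.length
  let w := (PySem.List.pyGetD m 0 "").toList.length
  -- while i < len(img) - h: rows are only ever replaced, len(img) is invariant, so the
  -- loop runs ((img.length : Int) - h).toNat times
  (List.range ((img.length : Int) - (h : Int)).toNat).foldl (fun g (i : Nat) =>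
    -- while j < len(img[0]) - w, re-read from the current g (row lengths are invariant under Pre_)
    (List.range (((PySem.List.pyGetD g 0 "").toList.length : Int) - (w : Int)).toNat).foldl
      (fun g (j : Nat) =>
        if is_monster_A g (i : Int) (j : Int) m then fill_s_mons_A g (i : Int) (j : Int) m
        else g) g) img

-- ===== PORT B =====
-- transliteration of Source B: candidate positions narrowed mask-cell by mask-cell against
-- the original img, then one rewrite pass; ''.join of a list of chars is String.ofList;
-- the membership test img[y+i][x+j] in '#o' is PySem.Str.pyGet? (none = IndexError,
-- unreached under Pre_; false is a total surrogate there); the set is PySem.Set.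
def fill_mons_alt (img : List String) (m : List String) : List String :=
  let h := m.length
  let w := (PySem.List.pyGetD m 0 "").toList.length
  let cand0 : List (Int × Int) :=
    (List.range ((img.length : Int) - (h : Int)).toNat).flatMap (fun (y : Nat) =>
      (List.range (((PySem.List.pyGetD img 0 "").toList.length : Int) - (w : Int)).toNat).map
        (fun (x : Nat) => ((y : Int), (x : Int))))
  let cand := (PySem.List.enumerate m).foldl (fun cand p =>
    (PySem.List.enumerate (PySem.Str.slice p.2 none (some (w : Int))).toList).foldl
      (fun cand q =>
        if q.2 ≠ ' ' then
          cand.filter (fun yx =>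
            match PySem.Str.pyGet? (PySem.List.pyGetD img (yx.1 + p.1) "") (yx.2 + q.1) with
            | some c => c = '#' || c = 'o'
            | none => false)
        else cand) cand) cand0
  let marked : PySem.Set (Int × Int) := PySem.Set.ofList
    (cand.flatMap (fun yx =>
      (PySem.List.enumerate m).flatMap (fun p =>
        (PySem.List.enumerate (PySem.Str.slice p.2 none (some (w : Int))).toList).filterMap
          (fun q => if q.2 = '#' then some (yx.1 + p.1, yx.2 + q.1) else none))))
  (PySem.List.enumerate img).map (fun r =>
    String.ofList ((PySem.List.enumerate r.2.toList).map (fun q =>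
      if PySem.Set.contains marked (r.1, q.1) then 'o' else q.2)))

-- ===== PRECONDITION & SPEC =====
-- Pre_ excludes inputs on which A raises: m = [] (IndexError on m[0]), and ragged grids
-- (a row of m shorter than m[0], or a row of img shorter than img[0]) when the position
-- scan actually runs — there A's m[i][j] / g[y+i][x+j] can raise IndexError; on the few
-- such ragged inputs where A happens to return (e.g. an all-space mask) both programs
-- agree anyway, so Pre_ is slightly narrower than needed.
def Pre_fill_mons (img : List String) (m : List String) : Prop :=
  m ≠ [] ∧
  ((m.length < img.length ∧
      (PySem.List.pyGetD m 0 "").toList.length < (PySem.List.pyGetD img 0 "").toList.length) →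
    (∀ r ∈ m, (PySem.List.pyGetD m 0 "").toList.length ≤ r.toList.length) ∧
    (∀ r ∈ img, (PySem.List.pyGetD img 0 "").toList.length ≤ r.toList.length))
instance (img : List String) (m : List String) : Decidable (Pre_fill_mons img m) := by
  unfold Pre_fill_mons; infer_instance
def pvWitness_fill_mons : List String × List String := (["###", "###", "###"], ["#"])

def Spec_fill_mons (img : List String) (m : List String) (out : List String) : Prop := out = fill_mons_alt img m
instance (img : List String) (m : List String) (out : List String) : Decidable (Spec_fill_mons img m out) := by unfold Spec_fill_mons; infer_instance

-- ===== CLAIM (what is proved, stated in full; the proofs are below) =====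
def Claim_equal_fill_mons : Prop := ∀ (img : List String) (m : List String), Dom_fill_mons img m → Pre_fill_mons img m → Spec_fill_mons img m (fill_mons img m)

-- ===== LEMMAS AND PROOFS =====

-- canonical cell tables (proof-side only)
def pvCells (h w : Nat) : List (Nat × Nat) :=
  (List.range h).flatMap (fun i => (List.range w).map (fun j => (i, j)))

def pvMch (m : List String) (c : Nat × Nat) : Char := (m.getD c.1 "").toList.getD c.2 ' '

def pvCheckCells (m : List String) (w : Nat) : List (Nat × Nat) :=
  (pvCells m.length w).filter (fun c => decide (pvMch m c ≠ ' '))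

def pvFillCells (m : List String) (w : Nat) : List (Nat × Nat) :=
  (pvCells m.length w).filter (fun c => decide (pvMch m c = '#'))

def pvHit (g : List String) (y x : Nat) (c : Nat × Nat) : Bool :=
  ((g.getD (y + c.1) "").toList.getD (x + c.2) ' ' = '#') ||
  ((g.getD (y + c.1) "").toList.getD (x + c.2) ' ' = 'o')

def pvMatch (img m : List String) (w y x : Nat) : Bool :=
  (pvCheckCells m w).all (pvHit img y x)

-- cells of img whose char is '#' or 'o' (the only cells A ever overwrites)
def pvOkS (img : List String) (S : List (Nat × Nat)) : Prop :=
  ∀ p ∈ S, ((img.getD p.1 "").toList.getD p.2 ' ' = '#') ∨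
           ((img.getD p.1 "").toList.getD p.2 ' ' = 'o')

-- img with 'o' written at every cell of S (the canonical meeting point of A and B)
def pvMark (img : List String) (S : List (Nat × Nat)) : List String :=
  (List.range img.length).map (fun r =>
    String.ofList ((List.range (img.getD r "").toList.length).map (fun k =>
      if (r, k) ∈ S then 'o' else (img.getD r "").toList.getD k ' ')))

def pvCellsOf (m : List String) (w y x : Nat) : List (Nat × Nat) :=
  (pvFillCells m w).map (fun c => (y + c.1, x + c.2))

theorem pvMem_cells {h w : Nat} {c : Nat × Nat} :
    c ∈ pvCells h w ↔ c.1 < h ∧ c.2 < w := by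
  cases c with
  | mk i j =>
    constructor
    · intro hc
      simp only [pvCells, List.mem_flatMap, List.mem_map, List.mem_range] at hc
      obtain ⟨a, ha, b, hb, hab⟩ := hc
      cases hab; exact ⟨ha, hb⟩
    · rintro ⟨hi, hj⟩
      simp only [pvCells, List.mem_flatMap, List.mem_map, List.mem_range]
      exact ⟨i, hi, j, hj, rfl⟩

-- a nested range fold IS the fold over the cell table
theorem pvFoldl_cells {σ : Type} (h w : Nat) (F : σ → Nat → Nat → σ) (init : σ) :
    (List.range h).foldl (fun s i => (List.range w).foldl (fun s j => F s i j) s) init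
      = (pvCells h w).foldl (fun s c => F s c.1 c.2) init := by
  simp [pvCells, List.foldl_flatMap, List.foldl_map]

theorem pvEnum_eq {α : Type} (l : List α) (d : α) :
    PySem.List.enumerate l = (List.range l.length).map (fun (k : Nat) => ((k : Int), l.getD k d)) := by
  rw [PySem.List.enumerate_eq_map_pyRange l d,
    show PySem.List.len l = ((l.length : Nat) : Int) from PySem.List.len_eq l,
    PySem.List.pyRange_zero_natCast, List.map_map]
  apply List.map_congr_left
  intro k _
  simp [PySem.List.pyGetD_natCast]

theorem pvFilterMap_if {α β : Type} (l : List α) (p : α → Prop) [DecidablePred p] (f : α → β) :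
    l.filterMap (fun a => if p a then some (f a) else none) =
      (l.filter (fun a => decide (p a))).map f := by
  induction l with
  | nil => rfl
  | cons a l ih => by_cases h : p a <;> simp [h, ih]

-- the Source B comprehensions over enumerate(m), enumerate(row[:w]) are exactly a filter of the cell table
theorem pvCellsB {β : Type} (m : List String) (w : Nat) (p : Char → Prop) [DecidablePred p]
    (f : Int → Int → β)
    (hw : ∀ r ∈ m, w ≤ r.toList.length) :
    ((PySem.List.enumerate m).flatMap (fun pr =>
        (PySem.List.enumerate (PySem.Str.slice pr.2 none (some (w : Int))).toList).filterMap
          (fun q => if p q.2 then some (f pr.1 q.1) else none)))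
    = ((pvCells m.length w).filter (fun c => decide (p (pvMch m c)))).map
        (fun (c : Nat × Nat) => f (c.1 : Int) (c.2 : Int)) := by
  rw [pvEnum_eq m ""]
  simp only [List.flatMap_map]
  have hinner : ∀ k ∈ List.range m.length,
      ((PySem.List.enumerate (PySem.Str.slice (m.getD k "") none (some (w : Int))).toList).filterMap
          (fun q => if p q.2 then some (f ((k : Nat) : Int) q.1) else none))
      = ((List.range w).filter (fun j => decide (p ((m.getD k "").toList.getD j ' ')))).map
          (fun (j : Nat) => f (k : Int) (j : Int)) := by
    intro k hk
    have hkm : k < m.length := List.mem_range.mp hk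
    have hrow : w ≤ (m.getD k "").toList.length := by
      apply hw; rw [List.getD_eq_getElem _ _ hkm]; exact List.getElem_mem hkm
    have hsl : (PySem.Str.slice (m.getD k "") none (some (w : Int))).toList
        = (m.getD k "").toList.take w := by
      simp [PySem.Str.toList_slice, PySem.Chars.slice_eq_listSlice, PySem.List.slice_to_natCast]
    rw [hsl, pvEnum_eq _ ' ', List.filterMap_map]
    have hlen : ((m.getD k "").toList.take w).length = w := by
      rw [List.length_take]; omega
    rw [hlen]
    rw [List.filterMap_congr (g := fun j =>
        if p ((m.getD k "").toList.getD j ' ') then some (f (k : Int) (j : Int)) else none)]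
    · exact pvFilterMap_if _ _ _
    · intro j hj
      have hjw : j < w := List.mem_range.mp hj
      have : ((m.getD k "").toList.take w).getD j ' ' = (m.getD k "").toList.getD j ' ' := by
        rw [List.getD_eq_getElem _ _ (by omega : j < ((m.getD k "").toList.take w).length),
            List.getD_eq_getElem _ _ (by omega : j < (m.getD k "").toList.length)]
        exact List.getElem_take
      simp only [Function.comp, this]
  rw [List.flatMap_def, List.map_congr_left hinner]
  rw [pvCells, List.filter_flatMap, List.map_flatMap]
  apply congrArg List.flatten
  apply List.map_congr_left
  intro a _
  rw [List.filter_map, List.map_map]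
  rfl

-- a nested enumerate fold over the mask IS the fold over the cell table
theorem pvFoldB {σ : Type} (m : List String) (w : Nat)
    (hw : ∀ r ∈ m, w ≤ r.toList.length) (F : σ → Int → Int → Char → σ) (init : σ) :
    (PySem.List.enumerate m).foldl (fun s pr =>
      (PySem.List.enumerate (PySem.Str.slice pr.2 none (some (w : Int))).toList).foldl
        (fun s q => F s pr.1 q.1 q.2) s) init
    = (pvCells m.length w).foldl (fun s c => F s (c.1 : Int) (c.2 : Int) (pvMch m c)) init := by
  rw [pvEnum_eq m "", List.foldl_map]
  rw [PySem.List.foldl_congr_mem _ _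
    (fun (s : σ) (k : Nat) =>
      (List.range w).foldl (fun s (j : Nat) => F s (k : Int) (j : Int) (pvMch m (k, j))) s) _ ?_]
  · rw [pvFoldl_cells]
  · intro s k hk
    beta_reduce
    have hkm : k < m.length := List.mem_range.mp hk
    have hrow : w ≤ (m.getD k "").toList.length := by
      apply hw; rw [List.getD_eq_getElem _ _ hkm]; exact List.getElem_mem hkm
    have hsl : (PySem.Str.slice (m.getD k "") none (some (w : Int))).toList
        = (m.getD k "").toList.take w := by
      simp [PySem.Str.toList_slice, PySem.Chars.slice_eq_listSlice, PySem.List.slice_to_natCast]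
    rw [hsl, pvEnum_eq _ ' ', List.foldl_map]
    have hlen : ((m.getD k "").toList.take w).length = w := by
      rw [List.length_take]; omega
    rw [hlen]
    apply PySem.List.foldl_congr_mem
    intro s j hj
    beta_reduce
    have hjw : j < w := List.mem_range.mp hj
    have hgd : ((m.getD k "").toList.take w).getD j ' ' = (m.getD k "").toList.getD j ' ' := by
      rw [List.getD_eq_getElem _ _ (by omega : j < ((m.getD k "").toList.take w).length),
          List.getD_eq_getElem _ _ (by omega : j < (m.getD k "").toList.length)]
      exact List.getElem_take
    rw [hgd]
    rfl

-- sequential filtering by each mask cell = one filter by the conjunction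
theorem pvFilterAll {α β : Type} (P : β → α → Bool) :
    ∀ (cs : List β) (S : List α),
      cs.foldl (fun S c => S.filter (P c)) S = S.filter (fun a => cs.all (fun c => P c a)) := by
  intro cs
  induction cs with
  | nil => intro S; simp
  | cons c cs ih =>
    intro S
    rw [List.foldl_cons, ih, List.filter_filter]
    apply List.filter_congr
    intro a _
    simp [Bool.and_comm]

theorem pvCount_fold (cs : List (Nat × Nat)) (p q : Nat × Nat → Bool) : ∀ (a b : Nat),
    cs.foldl (fun st c => if p c then (st.1 + 1, if q c then st.2 + 1 else st.2) else st) (a, b)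
    = (a + cs.countP p, b + (cs.filter p).countP q) := by
  induction cs with
  | nil => intro a b; simp
  | cons c cs ih =>
    intro a b
    by_cases hp : p c
    · by_cases hq : q c <;> simp [hp, hq, ih] <;> omega
    · simp [hp, ih]

theorem pvCount_all (l : List (Nat × Nat)) (q : Nat × Nat → Bool) :
    (l.length == l.countP q) = l.all q := by
  rw [Bool.eq_iff_iff]
  simp only [beq_iff_eq, List.all_eq_true]
  constructor
  · intro h; exact List.countP_eq_length.mp h.symm
  · intro h; exact (List.countP_eq_length.mpr h).symm

-- parallel fold: a relation preserved stepwise is preserved by the loops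
theorem pvFoldl_rel {σ τ α : Type} (R : σ → τ → Prop) (P : α → Prop)
    (fA : σ → α → σ) (fB : τ → α → τ) :
    ∀ (l : List α), (∀ a ∈ l, P a) →
      (∀ s t a, P a → R s t → R (fA s a) (fB t a)) →
      ∀ s t, R s t → R (l.foldl fA s) (l.foldl fB t) := by
  intro l
  induction l with
  | nil => intro _ _ s t h; exact h
  | cons a l ih =>
    intro hl hstep s t h
    exact ih (fun b hb => hl b (List.mem_cons_of_mem _ hb)) hstep _ _
      (hstep s t a (hl a List.mem_cons_self) h)

theorem pvFoldl_const {σ α : Type} (f : σ → α → σ) (b : σ) (hf : ∀ a, f b a = b) :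
    ∀ (l : List α), l.foldl f b = b := by
  intro l
  induction l with
  | nil => rfl
  | cons a l ih => rw [List.foldl_cons, hf, ih]

theorem pvRowLen {img g : List String}
    (hlens : g.map (fun s => s.toList.length) = img.map (fun s => s.toList.length))
    {k : Nat} (hk : k < img.length) :
    (g.getD k "").toList.length = (img.getD k "").toList.length := by
  have hg : g.length = img.length := by
    have := congrArg List.length hlens; simpa using this
  have h1 := congrArg (fun l => l.getD k 0) hlens
  simp only [List.getD_eq_getElem (g.map _) 0 (by simpa [hg] using hk),
    List.getD_eq_getElem (img.map _) 0 (by simpa using hk), List.getElem_map] at h1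
  rw [List.getD_eq_getElem _ _ (by omega : k < g.length), List.getD_eq_getElem _ _ hk]
  exact h1

theorem pvImgRow {img : List String} {len0 : Nat}
    (h_img : ∀ r ∈ img, len0 ≤ r.toList.length) {k : Nat} (hk : k < img.length) :
    len0 ≤ (img.getD k "").toList.length := by
  apply h_img; rw [List.getD_eq_getElem _ _ hk]; exact List.getElem_mem hk

-- the string splice g[:k] + 'o' + g[k+1:] is List.set on the characters
theorem pvSplice (row : String) (k : Nat) (hk : k < row.toList.length) :
    (PySem.Str.slice row none (some (k : Int)) ++ "o" ++
      PySem.Str.slice row (some ((k : Int) + 1)) none).toList = row.toList.set k 'o' := by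
  have h1 : ((k : Int) + 1) = ((k + 1 : Nat) : Int) := by push_cast; ring
  have ho : ("o" : String).toList = ['o'] := rfl
  rw [String.toList_append, String.toList_append, ho,
    PySem.Str.toList_slice, PySem.Str.toList_slice,
    PySem.Chars.slice_eq_listSlice, PySem.Chars.slice_eq_listSlice,
    PySem.List.slice_to_natCast, h1, PySem.List.slice_from_natCast,
    List.set_eq_take_cons_drop _ hk]
  simp

-- is_monster is the all() over the non-space cell table
theorem pvMonster (img m g : List String) (y x w : Nat)
    (hww : (PySem.List.pyGetD m 0 "").toList.length = w)
    (hw_m : ∀ r ∈ m, w ≤ r.toList.length)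
    (h_img : ∀ r ∈ img, (PySem.List.pyGetD img 0 "").toList.length ≤ r.toList.length)
    (hlens : g.map (fun s => s.toList.length) = img.map (fun s => s.toList.length))
    (hy : y + m.length ≤ img.length)
    (hx : x + w ≤ (PySem.List.pyGetD img 0 "").toList.length) :
    is_monster_A g (y : Int) (x : Int) m = (pvCheckCells m w).all (pvHit g y x) := by
  have hg : g.length = img.length := by
    have := congrArg List.length hlens; simpa using this
  unfold is_monster_A
  simp only [hww]
  rw [pvFoldl_cells]
  rw [PySem.List.foldl_congr_mem _ _
    (fun (st : Nat × Nat) c => if decide (pvMch m c ≠ ' ')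
      then (st.1 + 1, if pvHit g y x c then st.2 + 1 else st.2) else st) _ ?_]
  · rw [pvCount_fold]
    simp only [Nat.zero_add]
    rw [List.countP_eq_length_filter]
    exact pvCount_all _ _
  · intro acc c hc
    beta_reduce
    obtain ⟨hc1, hc2⟩ := pvMem_cells.mp hc
    have hrowm : w ≤ (m.getD c.1 "").toList.length := by
      apply hw_m; rw [List.getD_eq_getElem _ _ hc1]; exact List.getElem_mem hc1
    have hm1 : PySem.List.pyGetD m (c.1 : Int) "" = m.getD c.1 "" :=
      PySem.List.pyGetD_natCast m c.1 ""
    have hm2 : PySem.Str.pyGet? (m.getD c.1 "") (c.2 : Int) = some (pvMch m c) := by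
      have hge : pvMch m c = (m.getD c.1 "").toList[c.2]'(by omega) :=
        List.getD_eq_getElem _ _ (by omega)
      rw [PySem.Str.pyGet?_natCast, List.getElem?_eq_getElem (by omega), hge]
    have hyc : y + c.1 < img.length := by omega
    have hrowlen : (PySem.List.pyGetD img 0 "").toList.length
        ≤ (g.getD (y + c.1) "").toList.length := by
      rw [pvRowLen hlens hyc]; exact pvImgRow h_img hyc
    have hgl : y + c.1 < g.length := by omega
    have hxc : x + c.2 < (g.getD (y + c.1) "").toList.length := by omega
    have hgacc : (PySem.List.pyGet? g ((y : Int) + (c.1 : Int))).bind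
        (fun r => PySem.Str.pyGet? r ((x : Int) + (c.2 : Int)))
        = some ((g.getD (y + c.1) "").toList.getD (x + c.2) ' ') := by
      have e1 : ((y : Int) + (c.1 : Int)) = ((y + c.1 : Nat) : Int) := by push_cast; ring
      have e2 : ((x : Int) + (c.2 : Int)) = ((x + c.2 : Nat) : Int) := by push_cast; ring
      rw [e1, e2, PySem.List.pyGet?_natCast, List.getElem?_eq_getElem hgl,
        show g[y + c.1] = g.getD (y + c.1) "" from (List.getD_eq_getElem g "" hgl).symm]
      simp only [Option.bind_some, PySem.Str.pyGet?_natCast]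
      rw [List.getElem?_eq_getElem (by omega : x + c.2 < (g.getD (y + c.1) "").toList.length)]
      rw [show (g.getD (y + c.1) "").toList.getD (x + c.2) ' '
            = (g.getD (y + c.1) "").toList[x + c.2]'(by omega)
          from List.getD_eq_getElem _ _ (by omega)]
    rw [hm1, hm2, hgacc]
    by_cases hsp : pvMch m c = ' '
    · simp [hsp]
    · rw [if_pos (by simpa using hsp)]
      split
      · rename_i heq; simp_all
      · simp only [pvHit]
        simp
        split <;> rfl

-- ===== pvMark: cell access, identity, congruence, lengths =====

theorem pvMark_length (img : List String) (S : List (Nat × Nat)) :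
    (pvMark img S).length = img.length := by simp [pvMark]

theorem pvMark_row (img : List String) (S : List (Nat × Nat)) {r : Nat} (hr : r < img.length) :
    ((pvMark img S).getD r "").toList
      = (List.range (img.getD r "").toList.length).map (fun k =>
          if (r, k) ∈ S then 'o' else (img.getD r "").toList.getD k ' ') := by
  rw [pvMark, List.getD_eq_getElem _ _ (by simpa using hr), List.getElem_map,
    List.getElem_range, String.toList_ofList]

theorem pvMark_lens (img : List String) (S : List (Nat × Nat)) :
    (pvMark img S).map (fun s => s.toList.length) = img.map (fun s => s.toList.length) := by
  apply List.ext_getElem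
  · rw [List.length_map, List.length_map, pvMark_length]
  · intro r h1 h2
    have hr : r < img.length := by rw [List.length_map] at h2; exact h2
    have hr' : r < (pvMark img S).length := by rw [pvMark_length]; exact hr
    rw [List.getElem_map, List.getElem_map]
    rw [show (pvMark img S)[r] = (pvMark img S).getD r "" from
        (List.getD_eq_getElem _ "" hr').symm,
      show img[r] = img.getD r "" from (List.getD_eq_getElem _ "" hr).symm,
      pvMark_row img S hr, List.length_map, List.length_range]

theorem pvMark_cell (img : List String) (S : List (Nat × Nat)) (r k : Nat) :
    ((pvMark img S).getD r "").toList.getD k ' '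
      = if (r, k) ∈ S ∧ r < img.length ∧ k < (img.getD r "").toList.length then 'o'
        else (img.getD r "").toList.getD k ' ' := by
  by_cases hr : r < img.length
  · rw [pvMark_row img S hr]
    by_cases hk : k < (img.getD r "").toList.length
    · rw [List.getD_eq_getElem _ ' '
        (by rw [List.length_map, List.length_range]; exact hk),
        List.getElem_map, List.getElem_range]
      by_cases hm : (r, k) ∈ S
      · rw [if_pos hm, if_pos ⟨hm, hr, hk⟩]
      · rw [if_neg hm, if_neg (fun hc => hm hc.1)]
    · rw [List.getD_eq_default _ ' ' (by rw [List.length_map, List.length_range]; omega),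
        if_neg (fun hc => hk hc.2.2),
        List.getD_eq_default _ ' ' (by omega)]
  · have h0 : (pvMark img S).getD r "" = "" := by
      apply List.getD_eq_default; rw [pvMark_length]; omega
    have h1 : img.getD r "" = "" := by apply List.getD_eq_default; omega
    rw [h0, h1, if_neg (fun hc => hr hc.2.1)]

theorem pvMark_nil (img : List String) : pvMark img [] = img := by
  apply List.ext_getElem
  · rw [pvMark_length]
  · intro r h1 h2
    have hr : r < img.length := h2
    rw [show (pvMark img [])[r] = (pvMark img []).getD r "" from
        (List.getD_eq_getElem _ "" h1).symm]
    have hrow : ((pvMark img []).getD r "").toList = img[r].toList := by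
      rw [pvMark_row img [] hr]
      apply List.ext_getElem
      · rw [List.length_map, List.length_range,
          show img.getD r "" = img[r] from List.getD_eq_getElem _ "" hr]
      · intro k hk1 hk2
        rw [List.getElem_map, List.getElem_range, if_neg (List.not_mem_nil),
          show img.getD r "" = img[r] from List.getD_eq_getElem _ "" hr,
          List.getD_eq_getElem _ ' ' hk2]
    have := congrArg String.ofList hrow
    simpa [String.ofList_toList] using this

theorem pvMark_congr (img : List String) (S T : List (Nat × Nat))
    (h : ∀ c, c ∈ S ↔ c ∈ T) : pvMark img S = pvMark img T := by
  unfold pvMark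
  apply List.map_congr_left
  intro r _
  apply congrArg
  apply List.map_congr_left
  intro k _
  by_cases hm : (r, k) ∈ S
  · rw [if_pos hm, if_pos ((h _).mp hm)]
  · rw [if_neg hm, if_neg (fun hc => hm ((h _).mpr hc))]

-- writing one in-range cell of a marked image extends the set
theorem pvMark_set (img : List String) (S : List (Nat × Nat)) (r k : Nat)
    (hr : r < img.length) (_hk : k < (img.getD r "").toList.length)
    (v : String) (hv : v.toList = ((pvMark img S).getD r "").toList.set k 'o') :
    (pvMark img S).set r v = pvMark img ((r, k) :: S) := by
  have hmm : ∀ (a b : Nat), ¬(a = r ∧ b = k) → (((a, b) ∈ (r, k) :: S) ↔ ((a, b) ∈ S)) := by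
    intro a b hne
    simp only [List.mem_cons, Prod.mk.injEq]
    constructor
    · rintro (⟨h1, h2⟩ | h)
      · exact absurd ⟨h1, h2⟩ hne
      · exact h
    · exact Or.inr
  apply List.ext_getElem
  · rw [List.length_set, pvMark_length, pvMark_length]
  · intro a h1 h2
    have hr2 : a < img.length := by rw [pvMark_length] at h2; exact h2
    have hrm : a < (pvMark img S).length := by rw [pvMark_length]; exact hr2
    have key : ((pvMark img S).set r v)[a].toList = (pvMark img ((r, k) :: S))[a].toList := by
      rw [show (pvMark img ((r, k) :: S))[a] = (pvMark img ((r, k) :: S)).getD a "" from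
          (List.getD_eq_getElem _ "" h2).symm, pvMark_row img _ hr2, List.getElem_set]
      by_cases hrr : r = a
      · subst hrr
        rw [if_pos rfl, hv, pvMark_row img S hr]
        apply List.ext_getElem
        · simp
        · intro b hb1 hb2
          have hb2' : b < (img.getD r "").toList.length := by
            simpa using hb2
          simp only [List.getElem_set, List.getElem_map, List.getElem_range]
          by_cases hkk : k = b
          · subst hkk
            rw [if_pos rfl, if_pos List.mem_cons_self]
          · rw [if_neg hkk]
            have hms := hmm r b (fun hc => hkk hc.2.symm)
            by_cases hmem : (r, b) ∈ S
            · rw [if_pos hmem, if_pos (hms.mpr hmem)]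
            · rw [if_neg hmem, if_neg (fun hc => hmem (hms.mp hc))]
      · rw [if_neg hrr,
          show (pvMark img S)[a] = (pvMark img S).getD a "" from
            (List.getD_eq_getElem _ "" hrm).symm, pvMark_row img S hr2]
        apply List.ext_getElem
        · simp
        · intro b hb1 hb2
          simp only [List.getElem_map, List.getElem_range]
          have hms := hmm a b (fun hc => hrr hc.1.symm)
          by_cases hmem : (a, b) ∈ S
          · rw [if_pos hmem, if_pos (hms.mpr hmem)]
          · rw [if_neg hmem, if_neg (fun hc => hmem (hms.mp hc))]
    have := congrArg String.ofList key
    simpa [String.ofList_toList] using this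

-- marking only '#'/'o' cells never changes a monster test
theorem pvHit_mark (img : List String) (S : List (Nat × Nat)) (hok : pvOkS img S)
    (y x : Nat) (c : Nat × Nat) : pvHit (pvMark img S) y x c = pvHit img y x c := by
  unfold pvHit
  rw [pvMark_cell]
  split
  · rename_i h
    rcases hok _ h.1 with h' | h'
    · have h'' : (img.getD (y + c.1) "").toList.getD (x + c.2) ' ' = '#' := h'
      rw [h'']
      decide
    · have h'' : (img.getD (y + c.1) "").toList.getD (x + c.2) ' ' = 'o' := h'
      rw [h'']
  · rfl

theorem pvFill_sub_check (m : List String) (w : Nat) {c : Nat × Nat}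
    (hc : c ∈ pvFillCells m w) : c ∈ pvCheckCells m w := by
  rw [pvFillCells, List.mem_filter] at hc
  rw [pvCheckCells, List.mem_filter]
  refine ⟨hc.1, ?_⟩
  have : pvMch m c = '#' := by simpa using hc.2
  simp [this]

-- fill_s_mons as a fold over the '#' cell table (canonical form of A's fill)
theorem pvFillA (m g : List String) (y x w : Nat)
    (hww : (PySem.List.pyGetD m 0 "").toList.length = w)
    (hw_m : ∀ r ∈ m, w ≤ r.toList.length) :
    fill_s_mons_A g (y : Int) (x : Int) m =
      (pvFillCells m w).foldl (fun g c =>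
        g.set (y + c.1)
          (PySem.Str.slice (g.getD (y + c.1) "") none (some ((x + c.2 : Nat) : Int)) ++ "o" ++
            PySem.Str.slice (g.getD (y + c.1) "") (some (((x + c.2 : Nat) : Int) + 1)) none)) g := by
  unfold fill_s_mons_A
  simp only [hww]
  rw [pvFoldl_cells]
  rw [pvFillCells, List.foldl_filter]
  apply PySem.List.foldl_congr_mem
  intro acc c hc
  beta_reduce
  obtain ⟨hc1, hc2⟩ := pvMem_cells.mp hc
  have hrowm : w ≤ (m.getD c.1 "").toList.length := by
    apply hw_m; rw [List.getD_eq_getElem _ _ hc1]; exact List.getElem_mem hc1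
  have hm2 : PySem.Str.pyGet? (PySem.List.pyGetD m (c.1 : Int) "") (c.2 : Int)
      = some (pvMch m c) := by
    have hge : pvMch m c = (m.getD c.1 "").toList[c.2]'(by omega) :=
      List.getD_eq_getElem _ _ (by omega)
    rw [PySem.List.pyGetD_natCast, PySem.Str.pyGet?_natCast,
      List.getElem?_eq_getElem (by omega), hge]
  have e1 : ((y : Int) + (c.1 : Int)) = ((y + c.1 : Nat) : Int) := by push_cast; ring
  have e2 : ((x : Int) + (c.2 : Int)) = ((x + c.2 : Nat) : Int) := by push_cast; ring
  rw [hm2]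
  by_cases hsp : pvMch m c = '#'
  · simp only [hsp, beq_self_eq_true, if_true, decide_true]
    rw [e1, e2, PySem.List.pyGetD_natCast, PySem.List.pySetD_natCast]
  · have h1 : ¬ ((some (pvMch m c) == some '#') = true) := by simp [hsp]
    have h2 : ¬ (decide (pvMch m c = '#') = true) := by simp [hsp]
    rw [if_neg h1, if_neg h2]

-- A's fill starting from a marked image yields the marked image of the extended set
theorem pvFillFold (img : List String) (y x : Nat) :
    ∀ (cs : List (Nat × Nat)) (S : List (Nat × Nat)),
      (∀ c ∈ cs, y + c.1 < img.length ∧ x + c.2 < (img.getD (y + c.1) "").toList.length) →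
      cs.foldl (fun g c =>
          g.set (y + c.1)
            (PySem.Str.slice (g.getD (y + c.1) "") none (some ((x + c.2 : Nat) : Int)) ++ "o" ++
              PySem.Str.slice (g.getD (y + c.1) "") (some (((x + c.2 : Nat) : Int) + 1)) none))
        (pvMark img S)
      = pvMark img ((cs.map (fun c => (y + c.1, x + c.2))).reverse ++ S) := by
  intro cs
  induction cs with
  | nil => intro S _; simp
  | cons c cs ih =>
    intro S hb
    obtain ⟨hr, hk⟩ := hb c List.mem_cons_self
    have hrowlen : ((pvMark img S).getD (y + c.1) "").toList.length
        = (img.getD (y + c.1) "").toList.length := pvRowLen (pvMark_lens img S) hr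
    have hstep : (pvMark img S).set (y + c.1)
        (PySem.Str.slice ((pvMark img S).getD (y + c.1) "") none (some ((x + c.2 : Nat) : Int)) ++ "o" ++
          PySem.Str.slice ((pvMark img S).getD (y + c.1) "") (some (((x + c.2 : Nat) : Int) + 1)) none)
        = pvMark img ((y + c.1, x + c.2) :: S) := by
      apply pvMark_set img S (y + c.1) (x + c.2) hr hk
      exact pvSplice _ _ (by omega)
    rw [List.foldl_cons, hstep, ih _ (fun c hc => hb c (List.mem_cons_of_mem _ hc))]
    apply pvMark_congr
    intro p
    simp only [List.map_cons, List.reverse_cons, List.mem_append, List.mem_reverse,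
      List.mem_map, List.mem_cons, List.not_mem_nil, or_false]
    exact or_assoc.symm

-- membership in the model's accumulated cell set
theorem pvMem_model (img m : List String) (w : Nat) :
    ∀ (ps : List (Nat × Nat)) (S : List (Nat × Nat)) (p : Nat × Nat),
      p ∈ ps.foldl (fun S q =>
          if pvMatch img m w q.1 q.2 then (pvCellsOf m w q.1 q.2).reverse ++ S else S) S
      ↔ (∃ q ∈ ps, pvMatch img m w q.1 q.2 ∧ p ∈ pvCellsOf m w q.1 q.2) ∨ p ∈ S := by
  intro ps
  induction ps with
  | nil => intro S p; simp
  | cons q ps ih =>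
    intro S p
    rw [List.foldl_cons]
    by_cases hq : pvMatch img m w q.1 q.2
    · rw [if_pos hq, ih]
      simp only [List.mem_append, List.mem_reverse, List.mem_cons]
      constructor
      · rintro (⟨a, ha, h1, h2⟩ | (h | h))
        · exact Or.inl ⟨a, Or.inr ha, h1, h2⟩
        · exact Or.inl ⟨q, Or.inl rfl, hq, h⟩
        · exact Or.inr h
      · rintro (⟨a, ha, h1, h2⟩ | h)
        · rcases ha with rfl | ha
          · exact Or.inr (Or.inl h2)
          · exact Or.inl ⟨a, ha, h1, h2⟩
        · exact Or.inr (Or.inr h)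
    · rw [if_neg hq, ih]
      simp only [List.mem_cons]
      constructor
      · rintro (⟨a, ha, h1, h2⟩ | h)
        · exact Or.inl ⟨a, Or.inr ha, h1, h2⟩
        · exact Or.inr h
      · rintro (⟨a, ha, h1, h2⟩ | h)
        · rcases ha with rfl | ha
          · exact absurd h1 hq
          · exact Or.inl ⟨a, ha, h1, h2⟩
        · exact Or.inr h

-- B's final rewrite pass is pvMark (for any marked Nat-cell list)
theorem pvRebuild (img : List String) (L : List (Nat × Nat)) :
    (PySem.List.enumerate img).map (fun r =>
      String.ofList ((PySem.List.enumerate r.2.toList).map (fun q =>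
        if PySem.Set.contains
            (PySem.Set.ofList (L.map (fun (c : Nat × Nat) => ((c.1 : Int), (c.2 : Int)))))
            (r.1, q.1) then 'o' else q.2)))
    = pvMark img L := by
  rw [pvEnum_eq img "", List.map_map, pvMark]
  apply List.map_congr_left
  intro r _
  simp only [Function.comp]
  apply congrArg
  rw [pvEnum_eq _ ' ', List.map_map]
  apply List.map_congr_left
  intro k _
  simp only [Function.comp]
  have hmem : (((r : Int), (k : Int)) ∈
      (PySem.Set.ofList (L.map (fun (c : Nat × Nat) => ((c.1 : Int), (c.2 : Int)))))) ↔
      ((r, k) ∈ L) := by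
    rw [PySem.Set.mem_ofList, List.mem_map]
    constructor
    · rintro ⟨c, hc, he⟩
      have h1 : (c.1 : Int) = (r : Int) := congrArg Prod.fst he
      have h2 : (c.2 : Int) = (k : Int) := congrArg Prod.snd he
      have : c = (r, k) := by
        have := Int.natCast_inj.mp h1
        have := Int.natCast_inj.mp h2
        cases c; simp_all
      rwa [this] at hc
    · intro h; exact ⟨(r, k), h, rfl⟩
  by_cases hm : (r, k) ∈ L
  · rw [if_pos (by rw [PySem.Set.contains_iff]; exact hmem.mpr hm), if_pos hm]
  · rw [if_neg (by rw [PySem.Set.contains_iff]; exact fun hc => hm (hmem.mp hc)), if_neg hm]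

theorem fill_mons_spec : Claim_equal_fill_mons := by
  unfold Claim_equal_fill_mons
  intro img m _ hpre
  obtain ⟨hm0, hrag⟩ := hpre
  unfold Spec_fill_mons
  by_cases hrun : m.length < img.length ∧
      (PySem.List.pyGetD m 0 "").toList.length < (PySem.List.pyGetD img 0 "").toList.length
  · obtain ⟨hw_m, h_img⟩ := hrag hrun
    -- abbreviations
    set w := (PySem.List.pyGetD m 0 "").toList.length with hw
    set W := (PySem.List.pyGetD img 0 "").toList.length with hW
    set Hh := ((img.length : Int) - (m.length : Int)).toNat with hHh
    set Ww := ((W : Int) - (w : Int)).toNat with hWw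
    have hHh' : Hh = img.length - m.length := by omega
    have hWw' : Ww = W - w := by omega
    have himg0 : 0 < img.length := by omega
    -- bounds of cells of a matched position, and their ok-ness
    have hbounds : ∀ (y x : Nat), y < Hh → x < Ww → ∀ c ∈ pvFillCells m w,
        y + c.1 < img.length ∧ x + c.2 < (img.getD (y + c.1) "").toList.length := by
      intro y x hy hx c hc
      obtain ⟨hc1, hc2⟩ := pvMem_cells.mp (List.mem_of_mem_filter hc)
      have h1 : y + c.1 < img.length := by omega
      have h2 : W ≤ (img.getD (y + c.1) "").toList.length := pvImgRow h_img h1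
      exact ⟨h1, by omega⟩
    have hok_new : ∀ (y x : Nat), pvMatch img m w y x = true →
        ∀ p ∈ pvCellsOf m w y x,
          ((img.getD p.1 "").toList.getD p.2 ' ' = '#') ∨
          ((img.getD p.1 "").toList.getD p.2 ' ' = 'o') := by
      intro y x hmatch p hp
      obtain ⟨c, hc, rfl⟩ := List.mem_map.mp hp
      have hchk := List.all_eq_true.mp hmatch c (pvFill_sub_check m w hc)
      unfold pvHit at hchk
      rcases Bool.or_eq_true_iff.mp hchk with h | h
      · exact Or.inl (by simpa using h)
      · exact Or.inr (by simpa using h)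
    -- ===== A-side: one inner step of A's scan, against the model fold =====
    have hstepI : ∀ (y : Nat), y < Hh →
        ∀ (g : List String) (S : List (Nat × Nat)) (x : Nat), x < Ww →
        (g = pvMark img S ∧ pvOkS img S) →
        ((if is_monster_A g (y : Int) (x : Int) m then fill_s_mons_A g (y : Int) (x : Int) m else g)
            = pvMark img (if pvMatch img m w y x then (pvCellsOf m w y x).reverse ++ S else S)
          ∧ pvOkS img (if pvMatch img m w y x then (pvCellsOf m w y x).reverse ++ S else S)) := by
      intro y hy g S x hx hR
      obtain ⟨hg, hokS⟩ := hR
      have hlens : g.map (fun s => s.toList.length) = img.map (fun s => s.toList.length) := by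
        rw [hg]; exact pvMark_lens img S
      have hy' : y + m.length ≤ img.length := by omega
      have hx' : x + w ≤ W := by omega
      have hmon : is_monster_A g (y : Int) (x : Int) m = pvMatch img m w y x := by
        rw [pvMonster img m g y x w hw.symm hw_m h_img hlens hy' (hW ▸ hx')]
        rw [hg]
        unfold pvMatch
        exact List.all_congr rfl (fun c => pvHit_mark img S hokS y x c)
      rw [hmon]
      by_cases hmatch : pvMatch img m w y x
      · rw [if_pos hmatch, if_pos hmatch, hg,
          pvFillA m (pvMark img S) y x w hw.symm hw_m,
          pvFillFold img y x (pvFillCells m w) S (hbounds y x hy hx)]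
        constructor
        · rw [show pvCellsOf m w y x
              = (pvFillCells m w).map (fun c => (y + c.1, x + c.2)) from rfl]
        · intro p hp
          rcases List.mem_append.mp hp with h | h
          · exact hok_new y x hmatch p (List.mem_reverse.mp h)
          · exact hokS p h
      · rw [if_neg hmatch, if_neg hmatch]
        exact ⟨hg, hokS⟩
    -- A's whole scan against the model fold
    have hAside : fill_mons img m =
        pvMark img ((List.range Hh).foldl (fun S i =>
          (List.range Ww).foldl (fun S j =>
            if pvMatch img m w i j then (pvCellsOf m w i j).reverse ++ S else S) S) []) := by
      simp only [fill_mons]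
      refine (pvFoldl_rel
        (fun (g : List String) (S : List (Nat × Nat)) => g = pvMark img S ∧ pvOkS img S)
        (fun y => y < Hh)
        (fun g (i : Nat) =>
          (List.range (((PySem.List.pyGetD g 0 "").toList.length : Int) - (w : Int)).toNat).foldl
            (fun g (j : Nat) =>
              if is_monster_A g (i : Int) (j : Int) m then fill_s_mons_A g (i : Int) (j : Int) m
              else g) g)
        (fun S (i : Nat) =>
          (List.range Ww).foldl (fun S j =>
            if pvMatch img m w i j then (pvCellsOf m w i j).reverse ++ S else S) S)
        (List.range Hh) (fun a ha => List.mem_range.mp ha) ?_ img []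
        ⟨(pvMark_nil img).symm, fun p hp => absurd hp (List.not_mem_nil)⟩).1
      intro g S y hy hR
      beta_reduce
      obtain ⟨hg, hokS⟩ := hR
      have hlens : g.map (fun s => s.toList.length) = img.map (fun s => s.toList.length) := by
        rw [hg]; exact pvMark_lens img S
      have hbnd : (((PySem.List.pyGetD g 0 "").toList.length : Int) - (w : Int)).toNat = Ww := by
        have e1 : (PySem.List.pyGetD g 0 "").toList.length
            = (PySem.List.pyGetD img 0 "").toList.length := by
          rw [PySem.List.pyGetD_zero g "", PySem.List.pyGetD_zero img ""]
          exact pvRowLen hlens himg0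
        rw [e1, ← hW, hWw]
      rw [hbnd]
      exact pvFoldl_rel
        (fun (g : List String) (S : List (Nat × Nat)) => g = pvMark img S ∧ pvOkS img S)
        (fun x => x < Ww)
        (fun g (j : Nat) =>
          if is_monster_A g (y : Int) (j : Int) m then fill_s_mons_A g (y : Int) (j : Int) m else g)
        (fun S (j : Nat) =>
          if pvMatch img m w y j then (pvCellsOf m w y j).reverse ++ S else S)
        (List.range Ww) (fun a ha => List.mem_range.mp ha)
        (fun g S x hx hR => hstepI y hy g S x hx hR) g S ⟨hg, hokS⟩
    -- ===== B-side: fill_mons_alt img m = pvMark img S_B =====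
    set matchedN := (pvCells Hh Ww).filter (fun p => pvMatch img m w p.1 p.2) with hmatchedN
    have hBside : fill_mons_alt img m = pvMark img (matchedN.flatMap (fun p => pvCellsOf m w p.1 p.2)) := by
      simp only [fill_mons_alt]
      -- cand0 is the cast cell table
      have hcand0 : (List.range Hh).flatMap (fun (y : Nat) =>
          (List.range Ww).map (fun (x : Nat) => ((y : Int), (x : Int))))
          = (pvCells Hh Ww).map (fun (c : Nat × Nat) => ((c.1 : Int), (c.2 : Int))) := by
        unfold pvCells
        rw [List.map_flatMap]
        apply List.flatMap_congr
        intro y _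
        rw [List.map_map]
        rfl
      -- the filter loop is a single filter by pvMatch
      have hfold := pvFoldB m w hw_m
        (fun (cand : List (Int × Int)) (i j : Int) (ch : Char) =>
          if ch ≠ ' ' then
            cand.filter (fun yx =>
              match PySem.Str.pyGet? (PySem.List.pyGetD img (yx.1 + i) "") (yx.2 + j) with
              | some c => c = '#' || c = 'o'
              | none => false)
          else cand)
      rw [show (((PySem.List.pyGetD img 0 "").toList.length : Int) - ((PySem.List.pyGetD m 0 "").toList.length : Int)).toNat = Ww from rfl]
      rw [show ((img.length : Int) - ((m.length : Nat) : Int)).toNat = Hh from rfl]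
      rw [hcand0, hfold]
      rw [PySem.List.foldl_ite_eq_foldl_filter
        (fun (c : Nat × Nat) => pvMch m c ≠ ' ')
        (fun (cand : List (Int × Int)) (c : Nat × Nat) =>
          cand.filter (fun yx =>
            match PySem.Str.pyGet? (PySem.List.pyGetD img (yx.1 + (c.1 : Int)) "") (yx.2 + (c.2 : Int)) with
            | some ch => ch = '#' || ch = 'o'
            | none => false))]
      rw [show (pvCells m.length w).filter (fun c => decide (pvMch m c ≠ ' ')) = pvCheckCells m w from rfl]
      rw [pvFilterAll]
      rw [List.filter_map]
      -- the filtered predicate on a cast pair is pvMatch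
      have hpred : ∀ p ∈ pvCells Hh Ww,
          ((fun (a : Int × Int) => (pvCheckCells m w).all (fun c =>
              match PySem.Str.pyGet? (PySem.List.pyGetD img (a.1 + (c.1 : Int)) "")
                  (a.2 + (c.2 : Int)) with
              | some ch => ch = '#' || ch = 'o'
              | none => false)) ∘
            (fun (c : Nat × Nat) => ((c.1 : Int), (c.2 : Int)))) p
          = pvMatch img m w p.1 p.2 := by
        simp only [Function.comp]
        intro p hp
        obtain ⟨hp1, hp2⟩ := pvMem_cells.mp hp
        unfold pvMatch
        have hcell : ∀ c ∈ pvCheckCells m w,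
            (match PySem.Str.pyGet? (PySem.List.pyGetD img (((p.1 : Nat) : Int) + (c.1 : Int)) "")
                (((p.2 : Nat) : Int) + (c.2 : Int)) with
              | some ch => ch = '#' || ch = 'o'
              | none => false) = pvHit img p.1 p.2 c := ?_
        · rw [Bool.eq_iff_iff]
          simp only [List.all_eq_true]
          constructor
          · intro h c hc; rw [← hcell c hc]; exact h c hc
          · intro h c hc; rw [hcell c hc]; exact h c hc
        intro c hc
        obtain ⟨hc1, hc2⟩ := pvMem_cells.mp (List.mem_of_mem_filter hc)
        have h1 : p.1 + c.1 < img.length := by omega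
        have h2 : W ≤ (img.getD (p.1 + c.1) "").toList.length := pvImgRow h_img h1
        have h3 : p.2 + c.2 < (img.getD (p.1 + c.1) "").toList.length := by omega
        have e1 : ((p.1 : Int) + (c.1 : Int)) = ((p.1 + c.1 : Nat) : Int) := by push_cast; ring
        have e2 : ((p.2 : Int) + (c.2 : Int)) = ((p.2 + c.2 : Nat) : Int) := by push_cast; ring
        rw [e1, e2, PySem.List.pyGetD_natCast, PySem.Str.pyGet?_natCast,
          List.getElem?_eq_getElem (by omega : p.2 + c.2 < (img.getD (p.1 + c.1) "").toList.length)]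
        unfold pvHit
        rw [show (img.getD (p.1 + c.1) "").toList.getD (p.2 + c.2) ' '
              = (img.getD (p.1 + c.1) "").toList[p.2 + c.2]'(by omega)
            from List.getD_eq_getElem _ _ (by omega)]
      rw [List.filter_congr hpred]
      -- the marked set
      have hinner : ∀ (y x : Nat),
          ((PySem.List.enumerate m).flatMap (fun pr =>
            (PySem.List.enumerate (PySem.Str.slice pr.2 none (some ((w : Nat) : Int))).toList).filterMap
              (fun q => if q.2 = '#' then some (((y : Nat) : Int) + pr.1, ((x : Nat) : Int) + q.1) else none)))
          = (pvCellsOf m w y x).map (fun (c : Nat × Nat) => ((c.1 : Int), (c.2 : Int))) := by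
        intro y x
        rw [pvCellsB m w (fun ch => ch = '#')
          (fun i j => (((y : Nat) : Int) + i, ((x : Nat) : Int) + j)) hw_m]
        rw [show (pvCells m.length w).filter (fun c => decide (pvMch m c = '#')) = pvFillCells m w from rfl]
        rw [pvCellsOf, List.map_map]
        apply List.map_congr_left
        intro c _
        simp only [Function.comp, Prod.mk.injEq]
        constructor <;> push_cast <;> ring
      rw [List.flatMap_map]
      rw [List.flatMap_congr (fun p _ => hinner p.1 p.2)]
      rw [← List.map_flatMap]
      exact pvRebuild img _
    -- ===== both sides mark the same cell set =====
    rw [hAside, hBside]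
    apply pvMark_congr
    intro p
    rw [pvFoldl_cells Hh Ww (fun S i j =>
      if pvMatch img m w i j then (pvCellsOf m w i j).reverse ++ S else S) []]
    rw [pvMem_model img m w (pvCells Hh Ww) [] p]
    simp only [List.not_mem_nil, or_false, List.mem_flatMap, hmatchedN, List.mem_filter]
    constructor
    · rintro ⟨q, hq, h1, h2⟩
      exact ⟨q, ⟨hq, h1⟩, h2⟩
    · rintro ⟨q, ⟨hq, h1⟩, h2⟩
      exact ⟨q, hq, h1, h2⟩
  · -- the scan never runs: both programs return img unchanged
    have hz : ((img.length : Int) - (m.length : Int)).toNat = 0 ∨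
        (((PySem.List.pyGetD img 0 "").toList.length : Int)
          - ((PySem.List.pyGetD m 0 "").toList.length : Int)).toNat = 0 := by
      rcases not_and_or.mp hrun with h | h
      · left; omega
      · right; omega
    have hA0 : fill_mons img m = img := by
      simp only [fill_mons]
      rcases hz with h | h
      · rw [h]; rfl
      · apply pvFoldl_const
        intro i
        rw [h]
        rfl
    have hB0 : fill_mons_alt img m = img := by
      simp only [fill_mons_alt]
      have hc0 : (List.range ((img.length : Int) - ((m.length : Nat) : Int)).toNat).flatMap
          (fun (y : Nat) => (List.range (((PySem.List.pyGetD img 0 "").toList.length : Int)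
            - ((PySem.List.pyGetD m 0 "").toList.length : Int)).toNat).map
              (fun (x : Nat) => ((y : Int), (x : Int)))) = ([] : List (Int × Int)) := by
        rcases hz with h | h
        · rw [h]
          rfl
        · rw [h]
          simp
      rw [hc0]
      have houter : (PySem.List.enumerate m).foldl (fun (cand : List (Int × Int)) p =>
          (PySem.List.enumerate (PySem.Str.slice p.2 none
              (some (((PySem.List.pyGetD m 0 "").toList.length : Nat) : Int))).toList).foldl
            (fun cand q =>
              if q.2 ≠ ' ' then
                cand.filter (fun yx =>
                  match PySem.Str.pyGet? (PySem.List.pyGetD img (yx.1 + p.1) "") (yx.2 + q.1) with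
                  | some c => c = '#' || c = 'o'
                  | none => false)
              else cand) cand) ([] : List (Int × Int)) = ([] : List (Int × Int)) := by
        apply pvFoldl_const
        intro p
        apply pvFoldl_const
        intro q
        split <;> rfl
      rw [houter]
      rw [show ([] : List (Int × Int)).flatMap (fun yx =>
          (PySem.List.enumerate m).flatMap (fun p =>
            (PySem.List.enumerate (PySem.Str.slice p.2 none
                (some (((PySem.List.pyGetD m 0 "").toList.length : Nat) : Int))).toList).filterMap
              (fun q => if q.2 = '#' then some (yx.1 + p.1, yx.2 + q.1) else none)))
          = ([] : List (Int × Int)) from rfl]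
      have h2 := pvRebuild img []
      rw [pvMark_nil img] at h2
      exact h2
    rw [hA0, hB0]
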